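-- pv_equiv track=rewrite | github.com/Phineas-bot/PHINSECOLANG | backend/ecolang/interpreter.py | _extract_block_for_run
-- ===== SOURCE A (Python) =====
-- from typing import Any, Dict, List, Optional, Tuple
--
-- class EvalError(Exception):
--     """Raised when expression evaluation fails or a disallowed AST element is seen.
--
--     This exception is used to signal parse/validation errors in expressions and
--     is intentionally narrow: expression evaluation code should translate this
--     into the interpreter's RUNTIME_ERROR responses rather than leaking Python
--     exceptions to callers.
--
--     Attributes:
--         column: optional 1-based column where the error occurred within the expression
--         text: optional original expression text (single line)
--     """
--
--     def __init__(self, message: str, *, column: Optional[int] = None, text: Optional[str] = None):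
--         super().__init__(message)
--         self.column = column
--         self.text = text
--
-- def _extract_block_for_run(
--
--     lines: List[str],
--     start_idx: int,
-- ) -> Tuple[List[str], int]:
--     """Extract lines until matching 'end', handling nested blocks.
--     Returns (block_lines, index_of_end_line). This mirrors the local
--     `extract_block` used inside `run` so helper methods can reuse it.
--     """
--     block: List[str] = []
--     depth = 0
--     j = start_idx
--     while j < len(lines):
--         raw = lines[j]
--         txt = raw.strip()
--         # track nested starts
--         if txt.startswith("if ") or txt.startswith("repeat ") or txt.startswith("func ") or txt.startswith("while ") or txt.startswith("for "):
--             depth += 1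
--             block.append(raw)
--         elif txt == "end":
--             if depth == 0:
--                 return block, j
--             depth -= 1
--             block.append(raw)
--         else:
--             block.append(raw)
--         j += 1
--     # if we reach here, unmatched block
--     raise EvalError("Missing end for block")
-- ===== SOURCE B (Python) =====
-- class EvalError(Exception):
--     def __init__(self, message, *, column=None, text=None):
--         super().__init__(message)
--         self.column = column
--         self.text = text
--
--
-- def _extract_block_for_run(lines, start_idx):
--     """Recursive descent over nested blocks instead of a flat depth counter:
--     `scan` collects sibling lines from index j, recursing to splice in a whole
--     nested block (with its closing 'end') whenever it sees an opener, and
--     returns at the first top-level 'end'."""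
--     def scan(j):
--         block = []
--         while j < len(lines):
--             raw = lines[j]
--             txt = raw.strip()
--             if txt == "end":
--                 return block, j
--             block.append(raw)
--             if txt.startswith(("if ", "repeat ", "func ", "while ", "for ")):
--                 inner, e = scan(j + 1)
--                 block.extend(inner)
--                 block.append(lines[e])
--                 j = e + 1
--             else:
--                 j += 1
--         raise EvalError("Missing end for block")
--     return scan(start_idx)
-- ===== Notes on version B (the rewrite author's own statement) =====
-- stated objective: alternative
-- what changed: Replaces the flat depth-counter loop by recursive descent: a helper collects sibling lines and, on each block opener, recurses to consume the whole nested block (splicing in its lines and closing 'end') instead of tracking nesting depth.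
import Mathlib
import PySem

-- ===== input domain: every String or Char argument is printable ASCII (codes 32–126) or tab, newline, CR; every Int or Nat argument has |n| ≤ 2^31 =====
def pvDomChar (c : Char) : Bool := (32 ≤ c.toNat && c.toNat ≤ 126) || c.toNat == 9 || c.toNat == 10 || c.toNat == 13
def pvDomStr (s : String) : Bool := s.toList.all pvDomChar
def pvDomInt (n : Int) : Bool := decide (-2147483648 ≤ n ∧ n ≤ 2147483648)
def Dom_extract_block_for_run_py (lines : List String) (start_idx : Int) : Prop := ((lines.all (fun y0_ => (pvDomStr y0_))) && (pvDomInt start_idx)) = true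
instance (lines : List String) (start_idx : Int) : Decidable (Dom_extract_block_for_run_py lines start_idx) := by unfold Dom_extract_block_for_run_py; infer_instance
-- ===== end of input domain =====

-- B replaces A's flat depth-counter loop by recursive descent over nested blocks (objective: alternative decomposition, same cost).
-- A's 'raise EvalError("Missing end for block")' and the IndexError on start_idx < -len(lines) are ported as the sentinel ([], -1); Pre_ excludes exactly those inputs.

-- ===== PORT A =====
-- shared one-line helper: the opener test 'txt.startswith("if ") or txt.startswith("repeat ") or ...'
def pvOpener (t : String) : Bool :=
  PySem.Str.startswith t "if " || PySem.Str.startswith t "repeat " || PySem.Str.startswith t "func " ||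
    PySem.Str.startswith t "while " || PySem.Str.startswith t "for "

-- A's while loop: state (j, depth, block); ([], -1) encodes the raise / IndexError paths (outside Pre_)
def pvLoopA (lines : List String) (j depth : Int) (block : List String) : List String × Int :=
  if _h : j < (lines.length : Int) then
    match PySem.List.pyGet? lines j with
    | none => ([], -1)     -- IndexError lines[j] (j < -len); outside Pre_
    | some raw =>
      let txt := PySem.Str.strip raw
      if pvOpener txt then pvLoopA lines (j + 1) (depth + 1) (block ++ [raw])
      else if txt = "end" then
        if depth = 0 then (block, j)
        else pvLoopA lines (j + 1) (depth - 1) (block ++ [raw])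
      else pvLoopA lines (j + 1) depth (block ++ [raw])
  else ([], -1)            -- raise EvalError("Missing end for block"); outside Pre_
termination_by ((lines.length : Int) - j).toNat
decreasing_by all_goals omega

def extract_block_for_run_py (lines : List String) (start_idx : Int) : List String × Int :=
  pvLoopA lines start_idx 0 []

-- ===== PORT B =====
-- B's helper scan(j): a sibling loop (the Int argument j, the accumulator block) that recurses into nested
-- blocks on an opener; fuel is only the standard totality device (enough fuel is supplied at the top level)
def pvScanB (lines : List String) : Nat → Int → List String → Option (List String × Int)
  | 0, _, _ => none
  | f + 1, j, block =>
    if j < (lines.length : Int) then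
      match PySem.List.pyGet? lines j with
      | none => none       -- IndexError lines[j]
      | some raw =>
        let txt := PySem.Str.strip raw
        if txt = "end" then some (block, j)
        else if pvOpener txt then
          match pvScanB lines f (j + 1) [] with
          | none => none
          | some (inner, e) =>
            match PySem.List.pyGet? lines e with
            | none => none
            | some rawE => pvScanB lines f (e + 1) (block ++ [raw] ++ inner ++ [rawE])
        else pvScanB lines f (j + 1) (block ++ [raw])
    else none              -- raise EvalError("Missing end for block")

def extract_block_for_run_py_alt (lines : List String) (start_idx : Int) : List String × Int :=
  match pvScanB lines (((lines.length : Int) - start_idx).toNat + 1) start_idx [] with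
  | some r => r
  | none => ([], -1)

-- ===== PRECONDITION & SPEC =====
def pvIsEnd (s : String) : Bool := PySem.Str.strip s == "end"

-- the sequence of lines A actually scans (negative start_idx wraps Python-style through lines[j])
def pvSeq (lines : List String) (start_idx : Int) : List String :=
  if start_idx < 0 then lines.drop ((lines.length : Int) + start_idx).toNat ++ lines
  else lines.drop start_idx.toNat

-- Pre_ = exactly the inputs where A returns: no IndexError (start_idx ≥ -len when the loop runs) and the
-- scanned sequence contains an 'end' line preceded by equally many openers and 'end's (a matching top-level end).
def Pre_extract_block_for_run_py (lines : List String) (start_idx : Int) : Prop :=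
  ((!(start_idx < (lines.length : Int)) || (-(lines.length : Int) ≤ start_idx)) &&
    ((List.range (pvSeq lines start_idx).length).any (fun k =>
      pvIsEnd ((pvSeq lines start_idx).getD k "") &&
        (((pvSeq lines start_idx).take k).countP (fun s => pvOpener (PySem.Str.strip s)) ==
          ((pvSeq lines start_idx).take k).countP pvIsEnd)))) = true

instance (lines : List String) (start_idx : Int) : Decidable (Pre_extract_block_for_run_py lines start_idx) := by
  unfold Pre_extract_block_for_run_py; infer_instance

def pvWitness_extract_block_for_run_py : List String × Int := (["end"], 0)

def Spec_extract_block_for_run_py (lines : List String) (start_idx : Int) (out : List String × Int) : Prop := out = extract_block_for_run_py_alt lines start_idx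
instance (lines : List String) (start_idx : Int) (out : List String × Int) : Decidable (Spec_extract_block_for_run_py lines start_idx out) := by unfold Spec_extract_block_for_run_py; infer_instance

-- ===== CLAIM (what is proved, stated in full; the proofs are below) =====
def Claim_equal_extract_block_for_run_py : Prop := ∀ (lines : List String) (start_idx : Int), Dom_extract_block_for_run_py lines start_idx → Pre_extract_block_for_run_py lines start_idx → Spec_extract_block_for_run_py lines start_idx (extract_block_for_run_py lines start_idx)

-- ===== LEMMAS AND PROOFS =====

theorem pvOpener_end : pvOpener "end" = false := by decide

-- unfolding lemmas for A's loop
theorem loopA_stop {lines : List String} {j d : Int} {b : List String}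
    (hj : ¬ j < (lines.length : Int)) : pvLoopA lines j d b = ([], -1) := by
  rw [pvLoopA]; simp [hj]

theorem loopA_idx_none {lines : List String} {j d : Int} {b : List String}
    (hj : j < (lines.length : Int)) (hg : PySem.List.pyGet? lines j = none) :
    pvLoopA lines j d b = ([], -1) := by
  rw [pvLoopA]; simp [hj, hg]

theorem loopA_open {lines : List String} {j d : Int} {b : List String} {raw : String}
    (hj : j < (lines.length : Int)) (hg : PySem.List.pyGet? lines j = some raw)
    (hop : pvOpener (PySem.Str.strip raw) = true) :
    pvLoopA lines j d b = pvLoopA lines (j + 1) (d + 1) (b ++ [raw]) := by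
  rw [pvLoopA]; simp [hj, hg, hop]

theorem loopA_end_zero {lines : List String} {j : Int} {b : List String} {raw : String}
    (hj : j < (lines.length : Int)) (hg : PySem.List.pyGet? lines j = some raw)
    (he : PySem.Str.strip raw = "end") :
    pvLoopA lines j 0 b = (b, j) := by
  rw [pvLoopA]; simp [hj, hg, he, pvOpener_end]

theorem loopA_end_pos {lines : List String} {j d : Int} {b : List String} {raw : String}
    (hj : j < (lines.length : Int)) (hg : PySem.List.pyGet? lines j = some raw)
    (he : PySem.Str.strip raw = "end") (hd : d ≠ 0) :
    pvLoopA lines j d b = pvLoopA lines (j + 1) (d - 1) (b ++ [raw]) := by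
  rw [pvLoopA]; simp [hj, hg, he, pvOpener_end, hd]

theorem loopA_text {lines : List String} {j d : Int} {b : List String} {raw : String}
    (hj : j < (lines.length : Int)) (hg : PySem.List.pyGet? lines j = some raw)
    (hop : pvOpener (PySem.Str.strip raw) = false) (he : ¬ PySem.Str.strip raw = "end") :
    pvLoopA lines j d b = pvLoopA lines (j + 1) d (b ++ [raw]) := by
  rw [pvLoopA]; simp [hj, hg, hop, he]

-- B's accumulator is a pure prefix: scan with accumulator = scan with [] prefixed by it
theorem scan_acc (lines : List String) :
    ∀ (f : Nat) (j : Int) (block : List String),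
      pvScanB lines f j block = (pvScanB lines f j []).map (fun r => (block ++ r.1, r.2)) := by
  intro f
  induction f with
  | zero => intro j block; simp [pvScanB]
  | succ f ih =>
    intro j block
    simp only [pvScanB]
    by_cases hj : j < (lines.length : Int)
    · simp only [if_pos hj]
      cases hg : PySem.List.pyGet? lines j with
      | none => simp
      | some raw =>
        simp only
        by_cases he : PySem.Str.strip raw = "end"
        · simp [he]
        · simp only [if_neg he]
          by_cases hop : pvOpener (PySem.Str.strip raw) = true
          · simp only [if_pos hop]
            cases hS : pvScanB lines f (j + 1) [] with
            | none => simp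
            | some p =>
              obtain ⟨inner, e⟩ := p
              simp only
              cases hgE : PySem.List.pyGet? lines e with
              | none => simp
              | some rawE =>
                simp only
                rw [ih (e + 1) (block ++ [raw] ++ inner ++ [rawE]), ih (e + 1) ([] ++ [raw] ++ inner ++ [rawE])]
                cases pvScanB lines f (e + 1) [] <;> simp
          · simp only [if_neg hop]
            rw [ih (j + 1) (block ++ [raw]), ih (j + 1) ([] ++ [raw])]
            cases pvScanB lines f (j + 1) [] <;> simp
    · simp [hj]

-- the main correspondence: with enough fuel, B's scan from j describes exactly what A's loop does from j
theorem pv_main (lines : List String) :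
    ∀ (f : Nat) (j : Int), (lines.length : Int) - j + 1 ≤ (f : Int) →
      ((∀ bl e, pvScanB lines f j [] = some (bl, e) →
          j ≤ e ∧ e < (lines.length : Int) ∧
          ∃ rawE, PySem.List.pyGet? lines e = some rawE ∧ PySem.Str.strip rawE = "end" ∧
            (∀ block, pvLoopA lines j 0 block = (block ++ bl, e)) ∧
            (∀ d block, 0 ≤ d → pvLoopA lines j (d + 1) block = pvLoopA lines (e + 1) d (block ++ bl ++ [rawE]))) ∧
        (pvScanB lines f j [] = none → ∀ d block, 0 ≤ d → pvLoopA lines j d block = ([], -1))) := by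
  intro f
  induction f with
  | zero =>
    intro j hf
    constructor
    · intro bl e h; simp [pvScanB] at h
    · intro _ d block _
      exact loopA_stop (by push_cast at hf ⊢; omega)
  | succ f ih =>
    intro j hf
    by_cases hj : j < (lines.length : Int)
    · cases hg : PySem.List.pyGet? lines j with
      | none =>
        have hS : pvScanB lines (f + 1) j [] = none := by simp [pvScanB, hj, hg]
        constructor
        · intro bl e h; rw [hS] at h; cases h
        · intro _ d block _; exact loopA_idx_none hj hg
      | some raw =>
        by_cases he : PySem.Str.strip raw = "end"
        · have hS : pvScanB lines (f + 1) j [] = some ([], j) := by simp [pvScanB, hj, hg, he]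
          constructor
          · intro bl e h
            rw [hS] at h
            injection h with h'; injection h' with h1 h2
            subst h1; subst h2
            refine ⟨le_refl _, hj, raw, hg, he, ?_, ?_⟩
            · intro block; rw [loopA_end_zero hj hg he]; simp
            · intro d block hd
              rw [loopA_end_pos hj hg he (by omega)]
              simp
          · intro h; rw [hS] at h; cases h
        · by_cases hop : pvOpener (PySem.Str.strip raw) = true
          · -- opener: B recurses
            have hf1 : (lines.length : Int) - (j + 1) + 1 ≤ (f : Int) := by push_cast at hf ⊢; omega
            cases hS1 : pvScanB lines f (j + 1) [] with
            | none =>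
              have hS : pvScanB lines (f + 1) j [] = none := by
                simp [pvScanB, hj, hg, he, hop, hS1]
              constructor
              · intro bl e h; rw [hS] at h; cases h
              · intro _ d block hd
                rw [loopA_open hj hg hop]
                exact ((ih (j + 1) hf1).2) hS1 (d + 1) (block ++ [raw]) (by omega)
            | some p1 =>
              obtain ⟨inner, e1⟩ := p1
              obtain ⟨hje1, he1len, rawE1, hgE1, hstE1, hA1, hA2⟩ := ((ih (j + 1) hf1).1) inner e1 hS1
              have hf2 : (lines.length : Int) - (e1 + 1) + 1 ≤ (f : Int) := by push_cast at hf ⊢; omega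
              have hSfull : pvScanB lines (f + 1) j [] =
                  (pvScanB lines f (e1 + 1) []).map (fun r => ([raw] ++ inner ++ [rawE1] ++ r.1, r.2)) := by
                simp only [pvScanB, if_pos hj, hg]
                simp only [if_neg he, if_pos hop, hS1, hgE1]
                rw [scan_acc lines f (e1 + 1) ([] ++ [raw] ++ inner ++ [rawE1])]
                cases pvScanB lines f (e1 + 1) [] <;> simp
              cases hS2 : pvScanB lines f (e1 + 1) [] with
              | none =>
                constructor
                · intro bl e h; rw [hSfull, hS2] at h; cases h
                · intro _ d block hd
                  rw [loopA_open hj hg hop]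
                  have h2 := hA2 d (block ++ [raw]) hd
                  rw [h2]
                  exact ((ih (e1 + 1) hf2).2) hS2 d (block ++ [raw] ++ inner ++ [rawE1]) hd
              | some p2 =>
                obtain ⟨rest, e2⟩ := p2
                obtain ⟨he1e2, he2len, rawE2, hgE2, hstE2, hB1, hB2⟩ := ((ih (e1 + 1) hf2).1) rest e2 hS2
                constructor
                · intro bl e h
                  rw [hSfull, hS2] at h
                  simp only [Option.map_some] at h
                  injection h with h'; injection h' with h1 h2
                  subst h1; subst h2
                  refine ⟨by omega, he2len, rawE2, hgE2, hstE2, ?_, ?_⟩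
                  · intro block
                    rw [loopA_open hj hg hop, hA2 0 (block ++ [raw]) (by omega), hB1]
                    simp
                  · intro d block hd
                    rw [loopA_open hj hg hop, hA2 (d + 1) (block ++ [raw]) (by omega),
                      hB2 d (block ++ [raw] ++ inner ++ [rawE1]) hd]
                    simp
                · intro h; rw [hSfull, hS2] at h; cases h
          · -- ordinary text line
            have hop' : pvOpener (PySem.Str.strip raw) = false := by
              cases hx : pvOpener (PySem.Str.strip raw)
              · rfl
              · exact absurd hx hop
            have hf1 : (lines.length : Int) - (j + 1) + 1 ≤ (f : Int) := by push_cast at hf ⊢; omega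
            have hSfull : pvScanB lines (f + 1) j [] =
                (pvScanB lines f (j + 1) []).map (fun r => ([raw] ++ r.1, r.2)) := by
              simp only [pvScanB, if_pos hj, hg]
              simp only [if_neg he, hop, Bool.false_eq_true, if_false]
              rw [scan_acc lines f (j + 1) ([] ++ [raw])]
              cases pvScanB lines f (j + 1) [] <;> simp
            cases hS1 : pvScanB lines f (j + 1) [] with
            | none =>
              constructor
              · intro bl e h; rw [hSfull, hS1] at h; cases h
              · intro _ d block hd
                rw [loopA_text hj hg hop' he]
                exact ((ih (j + 1) hf1).2) hS1 d (block ++ [raw]) hd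
            | some p1 =>
              obtain ⟨bl', e1⟩ := p1
              obtain ⟨hje1, he1len, rawE1, hgE1, hstE1, hA1, hA2⟩ := ((ih (j + 1) hf1).1) bl' e1 hS1
              constructor
              · intro bl e h
                rw [hSfull, hS1] at h
                simp only [Option.map_some] at h
                injection h with h'; injection h' with h1 h2
                subst h1; subst h2
                refine ⟨by omega, he1len, rawE1, hgE1, hstE1, ?_, ?_⟩
                · intro block
                  rw [loopA_text hj hg hop' he, hA1]
                  simp
                · intro d block hd
                  rw [loopA_text hj hg hop' he, hA2 d (block ++ [raw]) hd]
                  simp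
              · intro h; rw [hSfull, hS1] at h; cases h
    · have hS : pvScanB lines (f + 1) j [] = none := by simp [pvScanB, hj]
      constructor
      · intro bl e h; rw [hS] at h; cases h
      · intro _ d block _; exact loopA_stop hj

-- ===== VERDICT (by name: the statement is the Claim_ definition above) =====
theorem extract_block_for_run_py_spec : Claim_equal_extract_block_for_run_py := by
  intro lines start_idx _hdom _hpre
  unfold Spec_extract_block_for_run_py extract_block_for_run_py extract_block_for_run_py_alt
  have hf : (lines.length : Int) - start_idx + 1 ≤
      ((((lines.length : Int) - start_idx).toNat + 1 : Nat) : Int) := by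
    push_cast
    omega
  have h := pv_main lines (((lines.length : Int) - start_idx).toNat + 1) start_idx hf
  cases hS : pvScanB lines (((lines.length : Int) - start_idx).toNat + 1) start_idx [] with
  | none =>
    rw [h.2 hS 0 [] (by omega)]
  | some p =>
    obtain ⟨bl, e⟩ := p
    obtain ⟨_, _, rawE, _, _, hA1, _⟩ := h.1 bl e hS
    rw [hA1 []]
    simp
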